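-- pv_equiv track=rewrite | github.com/Harshithpalan/AI-career-path-predictor | CareerAI/backend/services/skill_gap_analyzer.py | recommend_projects
-- ===== SOURCE A (Python) =====
-- from typing import Dict, List, Any, Tuple
--
-- def recommend_projects(target_career: str, user_skills: List[str]) -> List[str]:
--     """Recommend project ideas based on career and current skills"""
--     project_database = {
--         'Data Scientist': [
--             "Customer churn prediction using machine learning",
--             "Sentiment analysis on social media data",
--             "Stock price prediction with time series analysis",
--             "Recommendation system for e-commerce",
--             "COVID-19 data visualization and analysis"
--         ],
--         'ML Engineer': [
--             "Deploy ML model as REST API using FastAPI",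
--             "Build an image classification pipeline with MLOps",
--             "Create a real-time fraud detection system",
--             "Develop a chatbot with NLP capabilities",
--             "Build an automated ML pipeline with Airflow"
--         ],
--         'Software Developer': [
--             "Build a scalable microservices architecture",
--             "Create a real-time collaboration tool",
--             "Develop a performance monitoring system",
--             "Build a secure authentication system",
--             "Create a distributed caching solution"
--         ],
--         'Full Stack Developer': [
--             "Build a social media platform with React and Node.js",
--             "Create an e-commerce website with payment integration",
--             "Develop a real-time chat application",
--             "Build a project management tool",
--             "Create a video streaming platform"
--         ],
--         'Cybersecurity Analyst': [
--             "Build a network intrusion detection system",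
--             "Create a vulnerability scanner for web applications",
--             "Develop a security incident response dashboard",
--             "Build a password strength analyzer",
--             "Create a secure file sharing system"
--         ],
--         'Cloud Engineer': [
--             "Deploy a multi-tier application on AWS",
--             "Build an auto-scaling web application",
--             "Create a serverless data processing pipeline",
--             "Implement infrastructure as code with Terraform",
--             "Build a container orchestration system"
--         ],
--         'DevOps Engineer': [
--             "Build a complete CI/CD pipeline",
--             "Create an automated testing framework",
--             "Develop a container monitoring system",
--             "Build an infrastructure automation tool",
--             "Create a deployment orchestration platform"
--         ],
--         'Researcher': [
--             "Conduct a comprehensive literature review",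
--             "Design and execute an experimental study",
--             "Build a data collection and analysis framework",
--             "Create a research paper with reproducible results",
--             "Develop a novel algorithm for a specific problem"
--         ],
--         'Product Manager': [
--             "Create a product roadmap for a mobile app",
--             "Conduct user research and persona development",
--             "Design an MVP for a SaaS product",
--             "Build a competitive analysis framework",
--             "Create a go-to-market strategy"
--         ],
--         'UI/UX Engineer': [
--             "Design a mobile app UI/UX from scratch",
--             "Create a design system for a web application",
--             "Conduct usability testing and redesign",
--             "Build an interactive prototype",
--             "Design an accessible website"
--         ]
--     }
--
--     career_projects = project_database.get(target_career, [])
--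
--     # Filter projects based on current skills (prefer projects that use existing skills)
--     scored_projects = []
--     for project in career_projects:
--         score = 0
--         for skill in user_skills:
--             if skill.lower() in project.lower():
--                 score += 1
--         scored_projects.append((project, score))
--
--     # Sort by score and return top 5
--     scored_projects.sort(key=lambda x: x[1], reverse=True)
--     return [project for project, _ in scored_projects[:5]]
-- ===== SOURCE B (Python) =====
-- from typing import Dict, List, Any, Tuple
--
-- def recommend_projects(target_career: str, user_skills: List[str]) -> List[str]:
--     """Recommend project ideas based on career and current skills (bucket version)"""
--     project_database = {
--         'Data Scientist': [
--             "Customer churn prediction using machine learning",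
--             "Sentiment analysis on social media data",
--             "Stock price prediction with time series analysis",
--             "Recommendation system for e-commerce",
--             "COVID-19 data visualization and analysis"
--         ],
--         'ML Engineer': [
--             "Deploy ML model as REST API using FastAPI",
--             "Build an image classification pipeline with MLOps",
--             "Create a real-time fraud detection system",
--             "Develop a chatbot with NLP capabilities",
--             "Build an automated ML pipeline with Airflow"
--         ],
--         'Software Developer': [
--             "Build a scalable microservices architecture",
--             "Create a real-time collaboration tool",
--             "Develop a performance monitoring system",
--             "Build a secure authentication system",
--             "Create a distributed caching solution"
--         ],
--         'Full Stack Developer': [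
--             "Build a social media platform with React and Node.js",
--             "Create an e-commerce website with payment integration",
--             "Develop a real-time chat application",
--             "Build a project management tool",
--             "Create a video streaming platform"
--         ],
--         'Cybersecurity Analyst': [
--             "Build a network intrusion detection system",
--             "Create a vulnerability scanner for web applications",
--             "Develop a security incident response dashboard",
--             "Build a password strength analyzer",
--             "Create a secure file sharing system"
--         ],
--         'Cloud Engineer': [
--             "Deploy a multi-tier application on AWS",
--             "Build an auto-scaling web application",
--             "Create a serverless data processing pipeline",
--             "Implement infrastructure as code with Terraform",
--             "Build a container orchestration system"
--         ],
--         'DevOps Engineer': [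
--             "Build a complete CI/CD pipeline",
--             "Create an automated testing framework",
--             "Develop a container monitoring system",
--             "Build an infrastructure automation tool",
--             "Create a deployment orchestration platform"
--         ],
--         'Researcher': [
--             "Conduct a comprehensive literature review",
--             "Design and execute an experimental study",
--             "Build a data collection and analysis framework",
--             "Create a research paper with reproducible results",
--             "Develop a novel algorithm for a specific problem"
--         ],
--         'Product Manager': [
--             "Create a product roadmap for a mobile app",
--             "Conduct user research and persona development",
--             "Design an MVP for a SaaS product",
--             "Build a competitive analysis framework",
--             "Create a go-to-market strategy"
--         ],
--         'UI/UX Engineer': [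
--             "Design a mobile app UI/UX from scratch",
--             "Create a design system for a web application",
--             "Conduct usability testing and redesign",
--             "Build an interactive prototype",
--             "Design an accessible website"
--         ]
--     }
--
--     career_projects = project_database.get(target_career, [])
--
--     # Bucket projects by their skill-match score (kept in original order).
--     buckets = {}
--     for project in career_projects:
--         pl = project.lower()
--         score = sum(1 for skill in user_skills if skill.lower() in pl)
--         buckets[score] = buckets.get(score, []) + [project]
--
--     # Emit buckets from the highest possible score down to 0, take the first 5.
--     result = []
--     for s in range(len(user_skills), -1, -1):
--         result += buckets.get(s, [])
--     return result[:5]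
-- ===== Notes on version B (the rewrite author's own statement) =====
-- stated objective: alternative
-- what changed: Replaces A's stable descending comparison sort of (project, score) pairs by a score-indexed bucket pass: projects are appended in order to a dict mapping score -> projects, and buckets are emitted from score len(user_skills) down to 0.
import Mathlib
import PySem

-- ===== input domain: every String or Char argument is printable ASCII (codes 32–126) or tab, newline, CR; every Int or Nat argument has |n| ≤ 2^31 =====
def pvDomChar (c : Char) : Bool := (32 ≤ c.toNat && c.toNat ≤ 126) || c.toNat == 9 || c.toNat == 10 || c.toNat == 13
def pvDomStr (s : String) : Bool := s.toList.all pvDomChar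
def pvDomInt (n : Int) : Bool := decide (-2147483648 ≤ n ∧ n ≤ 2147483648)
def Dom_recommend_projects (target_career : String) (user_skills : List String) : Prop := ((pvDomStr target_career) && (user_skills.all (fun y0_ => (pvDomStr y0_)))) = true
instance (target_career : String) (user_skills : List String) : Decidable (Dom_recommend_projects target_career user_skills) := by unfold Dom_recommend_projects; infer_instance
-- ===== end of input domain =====

-- B replaces A's stable descending comparison sort by a score-indexed bucket pass
-- (append into a score->projects dict, then emit buckets from the highest score down): objective 'alternative'.

-- ===== PORT A =====
-- the fixed project database (a dict literal, shared verbatim by both Python versions)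
def pvProjectDatabase : PySem.Dict String (List String) := PySem.Dict.ofList [
  ("Data Scientist", [
    "Customer churn prediction using machine learning",
    "Sentiment analysis on social media data",
    "Stock price prediction with time series analysis",
    "Recommendation system for e-commerce",
    "COVID-19 data visualization and analysis"]),
  ("ML Engineer", [
    "Deploy ML model as REST API using FastAPI",
    "Build an image classification pipeline with MLOps",
    "Create a real-time fraud detection system",
    "Develop a chatbot with NLP capabilities",
    "Build an automated ML pipeline with Airflow"]),
  ("Software Developer", [
    "Build a scalable microservices architecture",
    "Create a real-time collaboration tool",
    "Develop a performance monitoring system",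
    "Build a secure authentication system",
    "Create a distributed caching solution"]),
  ("Full Stack Developer", [
    "Build a social media platform with React and Node.js",
    "Create an e-commerce website with payment integration",
    "Develop a real-time chat application",
    "Build a project management tool",
    "Create a video streaming platform"]),
  ("Cybersecurity Analyst", [
    "Build a network intrusion detection system",
    "Create a vulnerability scanner for web applications",
    "Develop a security incident response dashboard",
    "Build a password strength analyzer",
    "Create a secure file sharing system"]),
  ("Cloud Engineer", [
    "Deploy a multi-tier application on AWS",
    "Build an auto-scaling web application",
    "Create a serverless data processing pipeline",
    "Implement infrastructure as code with Terraform",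
    "Build a container orchestration system"]),
  ("DevOps Engineer", [
    "Build a complete CI/CD pipeline",
    "Create an automated testing framework",
    "Develop a container monitoring system",
    "Build an infrastructure automation tool",
    "Create a deployment orchestration platform"]),
  ("Researcher", [
    "Conduct a comprehensive literature review",
    "Design and execute an experimental study",
    "Build a data collection and analysis framework",
    "Create a research paper with reproducible results",
    "Develop a novel algorithm for a specific problem"]),
  ("Product Manager", [
    "Create a product roadmap for a mobile app",
    "Conduct user research and persona development",
    "Design an MVP for a SaaS product",
    "Build a competitive analysis framework",
    "Create a go-to-market strategy"]),
  ("UI/UX Engineer", [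
    "Design a mobile app UI/UX from scratch",
    "Create a design system for a web application",
    "Conduct usability testing and redesign",
    "Build an interactive prototype",
    "Design an accessible website"])]

def recommend_projects (target_career : String) (user_skills : List String) : List String :=
  let career_projects := pvProjectDatabase.getD target_career []
  -- for project in career_projects: score = 0; for skill in user_skills: if skill.lower() in project.lower(): score += 1; append (project, score)
  let scored_projects : List (String × Int) := career_projects.foldl (fun acc project =>
    acc ++ [(project,
      user_skills.foldl (fun score skill =>
        if PySem.Str.isIn (PySem.Str.lower skill) (PySem.Str.lower project) then score + 1 else score) 0)]) []
  -- scored_projects.sort(key=lambda x: x[1], reverse=True); return [project for project, _ in scored_projects[:5]]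
  (PySem.List.slice (PySem.List.sorted scored_projects (fun x => x.2) true) none (some 5)).map (fun x => x.1)

-- ===== PORT B =====
def recommend_projects_alt (target_career : String) (user_skills : List String) : List String :=
  let career_projects := pvProjectDatabase.getD target_career []
  -- buckets[score] = buckets.get(score, []) + [project], score = sum(1 for skill in user_skills if skill.lower() in project.lower())
  let buckets : PySem.Dict Int (List String) := career_projects.foldl (fun b project =>
    let score : Int := (user_skills.map (fun skill =>
        if PySem.Str.isIn (PySem.Str.lower skill) (PySem.Str.lower project) then (1 : Int) else 0)).sum
    b.insert score (b.getD score [] ++ [project])) ∅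
  -- result = []; for s in range(len(user_skills), -1, -1): result += buckets.get(s, []); return result[:5]
  let result := (PySem.List.pyRange (user_skills.length : Int) (-1) (-1)).foldl
    (fun acc s => acc ++ buckets.getD s []) []
  PySem.List.slice result none (some 5)

-- ===== PRECONDITION & SPEC =====
def Spec_recommend_projects (target_career : String) (user_skills : List String) (out : List String) : Prop := out = recommend_projects_alt target_career user_skills
instance (target_career : String) (user_skills : List String) (out : List String) : Decidable (Spec_recommend_projects target_career user_skills out) := by unfold Spec_recommend_projects; infer_instance

-- ===== CLAIM (what is proved, stated in full; the proofs are below) =====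
def Claim_equal_recommend_projects : Prop := ∀ (target_career : String) (user_skills : List String), Dom_recommend_projects target_career user_skills → Spec_recommend_projects target_career user_skills (recommend_projects target_career user_skills)

-- ===== LEMMAS AND PROOFS =====

theorem pvInsertBy_append {α : Type} (b : α → α → Bool) (x : α) (P Q : List α)
    (h : ∀ y ∈ P, b x y = false) :
    PySem.List.insertBy b x (P ++ Q) = P ++ PySem.List.insertBy b x Q := by
  induction P with
  | nil => simp
  | cons y P ih =>
    have hy : b x y = false := h y (by simp)
    simp [PySem.List.insertBy, hy, ih (fun z hz => h z (by simp [hz]))]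

theorem pvInsertBy_front {α : Type} (b : α → α → Bool) (x : α) (Q : List α)
    (h : ∀ y ∈ Q, b x y = true) :
    PySem.List.insertBy b x Q = x :: Q := by
  cases Q with
  | nil => simp [PySem.List.insertBy]
  | cons y Q => simp [PySem.List.insertBy, h y (by simp)]

theorem pvInsert_bucket (S : List Int) (hS : S.Pairwise (fun a b => b < a))
    (x : String × Int) (hx : x.2 ∈ S) (l : List (String × Int)) :
    PySem.List.insertBy (fun a b => decide (b.2 < a.2)) x
      (S.flatMap (fun s => l.filter (fun y => y.2 == s)))
    = S.flatMap (fun s => (l ++ [x]).filter (fun y => y.2 == s)) := by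
  induction S generalizing l with
  | nil => simp at hx
  | cons s S ih =>
    have hlt : ∀ t ∈ S, t < s := fun t ht => List.rel_of_pairwise_cons hS ht
    have hS' := hS.of_cons
    by_cases hxs : x.2 = s
    · -- x lands in the head bucket
      have h1 : PySem.List.insertBy (fun a b => decide (b.2 < a.2)) x
          ((l.filter (fun y => y.2 == s)) ++ S.flatMap (fun s => l.filter (fun y => y.2 == s)))
          = (l.filter (fun y => y.2 == s)) ++ (x :: S.flatMap (fun s => l.filter (fun y => y.2 == s))) := by
        rw [pvInsertBy_append]
        · rw [pvInsertBy_front]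
          intro y hy
          rcases List.mem_flatMap.mp hy with ⟨t, htS, hyt⟩
          have := (List.mem_filter.mp hyt).2
          have hyt2 : y.2 = t := by simpa using this
          simp [hyt2, hxs, hlt t htS]
        · intro y hy
          have := (List.mem_filter.mp hy).2
          have : y.2 = s := by simpa using this
          simp [this, hxs]
      have h2 : ∀ t ∈ S, (l ++ [x]).filter (fun y => y.2 == t) = l.filter (fun y => y.2 == t) := by
        intro t ht
        have : x.2 ≠ t := by have := hlt t ht; omega
        simp [List.filter_append, this]
      have h3 : (l ++ [x]).filter (fun y => y.2 == s) = l.filter (fun y => y.2 == s) ++ [x] := by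
        simp [List.filter_append, hxs]
      have h4 : List.flatMap (fun t => List.filter (fun y => y.2 == t) (l ++ [x])) S
              = List.flatMap (fun t => List.filter (fun y => y.2 == t) l) S :=
        List.flatMap_congr h2
      simp only [List.flatMap_cons]
      rw [h1, h3, h4]
      simp
    · have hxS : x.2 ∈ S := by
        rcases List.mem_cons.mp hx with h | h
        · exact absurd h hxs
        · exact h
      have hxlt : x.2 < s := hlt _ hxS
      have h3 : (l ++ [x]).filter (fun y => y.2 == s) = l.filter (fun y => y.2 == s) := by
        simp [List.filter_append, hxs]
      simp only [List.flatMap_cons]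
      rw [pvInsertBy_append]
      · rw [ih hS' hxS l, h3]
      · intro y hy
        have : y.2 = s := by simpa using (List.mem_filter.mp hy).2
        simp [this]; omega

theorem pvSorted_eq_buckets (S : List Int) (hS : S.Pairwise (fun a b => b < a))
    (l : List (String × Int)) (hl : ∀ y ∈ l, y.2 ∈ S) :
    PySem.List.sorted l (fun x => x.2) true
    = S.flatMap (fun s => l.filter (fun y => y.2 == s)) := by
  rw [PySem.List.sorted_rev_eq_foldl_insertBy]
  induction l using List.reverseRecOn with
  | nil => simp
  | append_singleton l x ih =>
    rw [List.foldl_append, List.foldl_cons, List.foldl_nil,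
      ih (fun y hy => hl y (by simp [hy])),
      pvInsert_bucket S hS x (hl x (by simp)) l]

theorem pvPyRange_down (N : Nat) :
    PySem.List.pyRange (N : Int) (-1) (-1) = (List.range (N + 1)).map (fun k : Nat => (N : Int) - k) := by
  have hneg : (-1:Int) < (N:Int) := by omega
  have h1 : ((N : Int) - (-1) + -(-1) - 1) / -(-1) = (N : Int) + 1 := by norm_num
  simp only [PySem.List.pyRange]
  norm_num [hneg, h1]
  intro a _
  ring

theorem pvPyRange_down_pairwise (N : Nat) :
    (PySem.List.pyRange (N : Int) (-1) (-1)).Pairwise (fun a b => b < a) := by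
  rw [pvPyRange_down]
  refine List.Pairwise.map _ ?_ ?_ (l := List.range (N+1)) (R := fun a b => a < b)
  · intro a b h; omega
  · exact List.pairwise_lt_range

theorem pvMem_pyRange_down (N : Nat) (s : Int) (h0 : 0 ≤ s) (hN : s ≤ N) :
    s ∈ PySem.List.pyRange (N : Int) (-1) (-1) := by
  rw [pvPyRange_down]
  refine List.mem_map.mpr ⟨(N - s.toNat), ?_, by omega⟩
  refine List.mem_range.mpr (by omega)

theorem pvBucketsD (f : String → Int) (ps : List String) (s : Int) :
    ((ps.foldl (fun b p => b.insert (f p) (b.getD (f p) [] ++ [p]))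
        (∅ : PySem.Dict Int (List String))).getD s [])
    = ps.filter (fun p => f p == s) := by
  induction ps using List.reverseRecOn generalizing s with
  | nil => simp [PySem.Dict.getD, PySem.Dict.get?, EmptyCollection.emptyCollection, PySem.Dict.empty]
  | append_singleton ps p ih =>
    rw [List.foldl_append, List.foldl_cons, List.foldl_nil,
      PySem.Dict.getD_insert, List.filter_append]
    by_cases h : s = f p
    · simp [h, ih]
    · have hf : (f p == s) = false := by simp; omega
      simp [h, hf, ih]

-- ===== VERDICT (by name: the statement is the Claim_ definition above) =====
theorem recommend_projects_spec : Claim_equal_recommend_projects := by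
  intro tc us _
  unfold Spec_recommend_projects recommend_projects recommend_projects_alt
  simp only [PySem.List.foldl_count_if, zero_add, PySem.List.foldl_append_singleton_eq_map,
    List.nil_append, PySem.List.foldl_append_eq_flatMap]
  simp only [pvBucketsD, PySem.List.sum_map_ite_one_zero]
  rw [pvSorted_eq_buckets (PySem.List.pyRange (us.length : Int) (-1) (-1))
        (pvPyRange_down_pairwise us.length) _
        (by
          intro y hy
          rcases List.mem_map.mp hy with ⟨p, _, rfl⟩
          exact pvMem_pyRange_down us.length _ (by positivity)
            (Int.ofNat_le.mpr (List.countP_le_length ..)))]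
  rw [PySem.List.slice_to _ (by norm_num), PySem.List.slice_to _ (by norm_num)]
  rw [List.map_take, List.map_flatMap]
  simp [List.filter_map, Function.comp_def]
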